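-- pv_equiv track=rewrite | github.com/OlympusLedgerOrg/Olympus | protocol/redaction.py | reconstruct_redacted_document
-- ===== SOURCE A (Python) =====
-- def reconstruct_redacted_document(
--     revealed_content: list[str],
--     revealed_indices: list[int],
--     total_parts: int,
--     redaction_marker: str = "[REDACTED]",
-- ) -> list[str]:
--     """
--     Reconstruct a document representation with redaction markers.
--
--     Positions not present in ``revealed_indices`` are filled with
--     ``redaction_marker``.
--
--     Args:
--         revealed_content: Revealed section text, one entry per index in
--                            ``revealed_indices`` (extra items are ignored).
--         revealed_indices: Ordered zero-based indices of revealed sections.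
--         total_parts: Total number of sections in the original document.
--         redaction_marker: Placeholder text for redacted sections.
--
--     Returns:
--         List of length ``total_parts`` containing revealed text or
--         ``redaction_marker`` at each position.
--     """
--     # Build a mapping from index to revealed text
--     index_to_content: dict[int, str] = {}
--     for idx, content in zip(revealed_indices, revealed_content):
--         index_to_content[idx] = content
--
--     return [
--         index_to_content[i] if i in index_to_content else redaction_marker
--         for i in range(total_parts)
--     ]
-- ===== SOURCE B (Python) =====
-- def reconstruct_redacted_document(
--     revealed_content: list[str],
--     revealed_indices: list[int],
--     total_parts: int,
--     redaction_marker: str = "[REDACTED]",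
-- ) -> list[str]:
--     # Dict-free gather: for each position, linearly scan the revealed pairs
--     # and keep the last fragment whose index matches (same last-wins rule as
--     # A's dict overwrite); positions with no match stay the marker.
--     out = []
--     for i in range(total_parts):
--         val = redaction_marker
--         for idx, content in zip(revealed_indices, revealed_content):
--             if idx == i:
--                 val = content
--         out.append(val)
--     return out
-- ===== Notes on version B (the rewrite author's own statement) =====
-- stated objective: alternative
-- what changed: B removes the dict entirely: it gathers each output position by a direct linear scan over the revealed (index, content) pairs keeping the last match, instead of A's staged hash-map build followed by per-position membership lookup.
import Mathlib
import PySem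

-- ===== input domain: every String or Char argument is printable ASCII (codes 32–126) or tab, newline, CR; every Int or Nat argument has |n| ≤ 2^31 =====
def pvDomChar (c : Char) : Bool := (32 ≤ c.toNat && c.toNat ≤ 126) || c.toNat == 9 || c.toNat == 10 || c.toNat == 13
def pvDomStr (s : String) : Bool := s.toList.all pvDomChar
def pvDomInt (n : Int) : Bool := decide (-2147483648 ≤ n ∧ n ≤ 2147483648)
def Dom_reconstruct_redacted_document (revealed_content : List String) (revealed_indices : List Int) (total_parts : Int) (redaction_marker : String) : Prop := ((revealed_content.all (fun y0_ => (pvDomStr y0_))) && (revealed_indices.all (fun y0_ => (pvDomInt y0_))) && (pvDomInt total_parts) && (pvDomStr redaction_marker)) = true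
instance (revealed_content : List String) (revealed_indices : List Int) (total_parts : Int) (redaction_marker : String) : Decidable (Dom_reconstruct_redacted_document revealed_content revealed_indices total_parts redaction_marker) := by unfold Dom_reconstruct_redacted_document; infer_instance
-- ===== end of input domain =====

-- B gathers each position by a direct last-match linear scan over the revealed pairs,
-- with no dict at all, instead of A's staged dict build + per-position membership lookup.

-- ===== PORT A =====
def reconstruct_redacted_document (revealed_content : List String) (revealed_indices : List Int) (total_parts : Int) (redaction_marker : String) : List String :=
  let index_to_content : PySem.Dict Int String :=
    (revealed_indices.zip revealed_content).foldl (fun d p => d.insert p.1 p.2) PySem.Dict.empty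
  (PySem.List.pyRange 0 total_parts 1).map (fun i =>
    if index_to_content.contains i then index_to_content.getD i redaction_marker
    else redaction_marker)

-- ===== PORT B =====
def reconstruct_redacted_document_alt (revealed_content : List String) (revealed_indices : List Int) (total_parts : Int) (redaction_marker : String) : List String :=
  (PySem.List.pyRange 0 total_parts 1).map (fun i =>
    (revealed_indices.zip revealed_content).foldl
      (fun val p => if p.1 == i then p.2 else val) redaction_marker)

-- ===== PRECONDITION & SPEC =====
def Spec_reconstruct_redacted_document (revealed_content : List String) (revealed_indices : List Int) (total_parts : Int) (redaction_marker : String) (out : List String) : Prop := out = reconstruct_redacted_document_alt revealed_content revealed_indices total_parts redaction_marker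
instance (revealed_content : List String) (revealed_indices : List Int) (total_parts : Int) (redaction_marker : String) (out : List String) : Decidable (Spec_reconstruct_redacted_document revealed_content revealed_indices total_parts redaction_marker out) := by unfold Spec_reconstruct_redacted_document; infer_instance

-- ===== CLAIM (what is proved, stated in full; the proofs are below) =====
def Claim_equal_reconstruct_redacted_document : Prop := ∀ (revealed_content : List String) (revealed_indices : List Int) (total_parts : Int) (redaction_marker : String), Dom_reconstruct_redacted_document revealed_content revealed_indices total_parts redaction_marker → Spec_reconstruct_redacted_document revealed_content revealed_indices total_parts redaction_marker (reconstruct_redacted_document revealed_content revealed_indices total_parts redaction_marker)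

-- ===== LEMMAS AND PROOFS =====

-- The last-match fold over the pairs computes exactly the dict-overwrite lookup.
lemma lastmatch_eq_dict (i : Int) (m : String) (ps : List (Int × String))
    (d : PySem.Dict Int String) (v : String)
    (hv : (if d.contains i then d.getD i m else m) = v) :
    (if (ps.foldl (fun d p => d.insert p.1 p.2) d).contains i then
       (ps.foldl (fun d p => d.insert p.1 p.2) d).getD i m else m) =
    ps.foldl (fun val p => if p.1 == i then p.2 else val) v := by
  induction ps generalizing d v with
  | nil => exact hv
  | cons p ps ih =>
    simp only [List.foldl_cons]
    apply ih
    rw [PySem.Dict.contains_insert, PySem.Dict.getD_insert]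
    by_cases he : p.1 = i
    · simp [he]
    · have h1 : (i == p.1) = false := by simp [Ne.symm he]
      have h2 : (p.1 == i) = false := by simp [he]
      simp only [h1, h2, Bool.false_or, if_neg (Ne.symm he)]
      exact hv

-- ===== VERDICT (by name: the statement is the Claim_ definition above) =====
theorem reconstruct_redacted_document_spec : Claim_equal_reconstruct_redacted_document := by
  intro rc ri n m _
  show _ = _
  unfold reconstruct_redacted_document reconstruct_redacted_document_alt
  simp only []
  apply List.map_congr_left
  intro i _
  exact lastmatch_eq_dict i m (ri.zip rc) PySem.Dict.empty m (by simp [PySem.Dict.contains_empty])
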